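-- pv_equiv track=rewrite | github.com/FilippoPisello/advent-of-code | advent_of_code/y2025/day11/max/solution.py | _expand_paths
-- ===== SOURCE A (Python) =====
-- def _expand_paths(
--     server_tree: dict, paths: list[list[str]], ending: str, accepted_steps: list[str]
-- ) -> list[list[str]]:
--     while True:
--         temp_paths = []
--         count_outs_and_dead_ends = 0
--
--         for path in paths:
--             current_key = path[-1]
--
--             if current_key == ending:
--                 count_outs_and_dead_ends += 1
--                 temp_paths.append(path)
--                 continue
--
--             if current_key in accepted_steps:
--                 for seed in server_tree[current_key]:
--                     temp_path = path.copy()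
--                     temp_path.append(seed)
--                     temp_paths.append(temp_path)
--
--         paths = temp_paths
--
--         if count_outs_and_dead_ends == len(paths):
--             break
--
--     return paths
-- ===== SOURCE B (Python) =====
-- def _expand_paths(
--     server_tree: dict, paths: list[list[str]], ending: str, accepted_steps: list[str]
-- ) -> list[list[str]]:
--     out = []
--     for start in paths:
--         stack = [start]
--         while stack:
--             path = stack.pop()
--             key = path[-1]
--             if key == ending:
--                 out.append(path)
--             elif key in accepted_steps:
--                 for seed in reversed(server_tree[key]):
--                     stack.append(path + [seed])
--     return out
-- ===== Notes on version B (the rewrite author's own statement) =====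
-- stated objective: alternative
-- what changed: A repeatedly rewrites the whole frontier (re-copying every already-finished path on each while-round until every path ends at `ending`); B runs an explicit-stack iterative DFS per input path (children pushed in reverse so they pop in order), emitting each accepting path exactly once, in DFS pre-order, which equals A's output order.
-- outside the precondition, e.g. on _expand_paths({}, [[]], 'e', []): A raises IndexError, B raises IndexError; on _expand_paths({}, [['a']], 'e', ['a']): A raises KeyError, B raises KeyError
import Mathlib
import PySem

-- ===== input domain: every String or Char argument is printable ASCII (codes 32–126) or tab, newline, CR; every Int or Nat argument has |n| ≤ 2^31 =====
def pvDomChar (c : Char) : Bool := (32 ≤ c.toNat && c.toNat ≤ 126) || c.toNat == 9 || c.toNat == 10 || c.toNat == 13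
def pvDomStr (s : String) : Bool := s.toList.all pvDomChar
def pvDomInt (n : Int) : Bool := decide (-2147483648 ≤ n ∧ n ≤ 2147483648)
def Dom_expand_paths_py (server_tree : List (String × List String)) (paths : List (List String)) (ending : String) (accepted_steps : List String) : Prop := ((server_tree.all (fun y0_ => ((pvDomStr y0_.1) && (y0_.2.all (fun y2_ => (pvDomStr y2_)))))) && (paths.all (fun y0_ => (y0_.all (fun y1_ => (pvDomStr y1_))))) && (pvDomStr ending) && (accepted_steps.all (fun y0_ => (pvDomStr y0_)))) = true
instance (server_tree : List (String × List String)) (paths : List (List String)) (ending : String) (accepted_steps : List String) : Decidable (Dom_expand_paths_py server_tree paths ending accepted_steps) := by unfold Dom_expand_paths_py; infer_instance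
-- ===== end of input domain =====

-- B replaces A's repeated whole-frontier rewriting (which re-copies every finished path each
-- round) with a per-path explicit-stack iterative DFS; equal output on every terminating input.

-- ===== PORT A =====
-- One fuel step = one iteration of A's `while True`.  Under Pre_ the fuel `|server_tree| + 2`
-- is never exhausted (the loop has broken before then), so the fueled loop is A's loop.
-- `path[-1]` on an empty path (IndexError) and `server_tree[k]` on a missing key (KeyError)
-- raise in Python; both are excluded by Pre_, here those paths contribute nothing.
def pvLoopA (server_tree : List (String × List String)) (ending : String) (accepted_steps : List String) : Nat → List (List String) → List (List String)
  | 0, paths => paths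
  | Nat.succ n, paths =>
    let r : Nat × List (List String) :=
      paths.foldl (fun s path =>
        match PySem.List.pyGet? path (-1) with
        | none => s  -- IndexError in Python; excluded by Pre_
        | some current_key =>
          if current_key == ending then (s.1 + 1, s.2 ++ [path])
          else if accepted_steps.contains current_key then
            match (PySem.Dict.mk server_tree).get? current_key with
            | none => s  -- KeyError in Python; excluded by Pre_
            | some seeds => (s.1, seeds.foldl (fun tp seed => tp ++ [path ++ [seed]]) s.2)
          else s) ((0 : Nat), ([] : List (List String)))
    if r.1 == r.2.length then r.2 else pvLoopA server_tree ending accepted_steps n r.2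

def expand_paths_py (server_tree : List (String × List String)) (paths : List (List String)) (ending : String) (accepted_steps : List String) : List (List String) :=
  pvLoopA server_tree ending accepted_steps (server_tree.length + 2) paths

-- ===== PORT B =====
-- Source B's `while stack:` loop needs a termination witness in Lean: pvCostK/pvStackCost compute,
-- from the input alone, an upper bound on the number of loop iterations (the size of the search
-- tree explored to depth |server_tree|+2); under Pre_ this fuel is never exhausted, so the
-- fueled loop is exactly Source B's loop.  The Python stack (append/pop at the right end) is
-- modelled head-first: Python's top of stack is the Lean list head, one `append` = one cons.
def pvCostK (server_tree : List (String × List String)) (ending : String) (accepted_steps : List String) : Nat → String → Nat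
  | 0, _ => 1
  | Nat.succ n, k =>
    if k == ending then 1
    else if accepted_steps.contains k then
      match (PySem.Dict.mk server_tree).get? k with
      | none => 1
      | some seeds => 1 + (seeds.map (pvCostK server_tree ending accepted_steps n)).sum
    else 1

def pvStackCost (server_tree : List (String × List String)) (ending : String) (accepted_steps : List String) (d : Nat) (stack : List (List String)) : Nat :=
  (stack.map (fun p =>
    match PySem.List.pyGet? p (-1) with
    | none => 1
    | some k => pvCostK server_tree ending accepted_steps d k)).sum

-- the `while stack:` loop for ONE starting path, out-accumulator threaded through
def pvRun (server_tree : List (String × List String)) (ending : String) (accepted_steps : List String) : Nat → List (List String) → List (List String) → List (List String)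
  | 0, _, out => out  -- fuel exhausted; never reached under Pre_
  | Nat.succ _, [], out => out
  | Nat.succ n, path :: stack, out =>
    match PySem.List.pyGet? path (-1) with
    | none => pvRun server_tree ending accepted_steps n stack out  -- IndexError in Python; excluded by Pre_
    | some key =>
      if key == ending then pvRun server_tree ending accepted_steps n stack (out ++ [path])
      else if accepted_steps.contains key then
        match (PySem.Dict.mk server_tree).get? key with
        | none => pvRun server_tree ending accepted_steps n stack out  -- KeyError in Python; excluded by Pre_
        | some seeds =>
          -- `for seed in reversed(seeds): stack.append(path + [seed])`: each append is a cons
          pvRun server_tree ending accepted_steps n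
            (seeds.reverse.foldl (fun st seed => (path ++ [seed]) :: st) stack) out
      else pvRun server_tree ending accepted_steps n stack out

def expand_paths_py_alt (server_tree : List (String × List String)) (paths : List (List String)) (ending : String) (accepted_steps : List String) : List (List String) :=
  paths.foldl (fun out start =>
    pvRun server_tree ending accepted_steps
      (pvStackCost server_tree ending accepted_steps (server_tree.length + 2) [start]) [start] out) []

-- ===== PRECONDITION & SPEC =====
-- The KEY GRAPH of the input (a property of the arguments, independent of either port, which
-- both manipulate whole path lists): key k has an edge to each entry of server_tree[k] exactly
-- when k is accepted and not `ending`.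
def pvSucc (server_tree : List (String × List String)) (ending : String) (accepted_steps : List String) (k : String) : List String :=
  if accepted_steps.contains k && !(k == ending) then ((PySem.Dict.mk server_tree).get? k).getD [] else []

-- keys reachable by a key-graph walk of exactly n edges starting in g
def pvIter (server_tree : List (String × List String)) (ending : String) (accepted_steps : List String) : Nat → List String → List String
  | 0, g => g
  | Nat.succ n, g => pvIter server_tree ending accepted_steps n ((g.flatMap (pvSucc server_tree ending accepted_steps)).dedup)

-- starting keys: the last elements of the given paths
def pvStarts (paths : List (List String)) : List String :=
  (paths.filterMap (fun p => PySem.List.pyGet? p (-1))).dedup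

-- all keys reachable in at most n key-graph edges from the paths' last keys
def pvClosure (server_tree : List (String × List String)) (ending : String) (accepted_steps : List String) (paths : List (List String)) : Nat → List String
  | 0 => pvStarts paths
  | Nat.succ n =>
    let c := pvClosure server_tree ending accepted_steps paths n
    (c ++ c.flatMap (pvSucc server_tree ending accepted_steps)).dedup

-- Pre_ excludes exactly the inputs on which Python A does not return normally:
-- an empty path in `paths` (IndexError), a reachable accepted non-ending key missing from
-- server_tree (KeyError), and a key walk longer than the number of dict entries — which, the
-- graph being finite, is exactly a reachable cycle, on which A's while-loop never terminates.
def Pre_expand_paths_py (server_tree : List (String × List String)) (paths : List (List String)) (ending : String) (accepted_steps : List String) : Prop :=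
  (∀ p ∈ paths, p ≠ []) ∧
  (∀ k ∈ pvClosure server_tree ending accepted_steps paths (server_tree.length + 1),
      (accepted_steps.contains k ∧ k ≠ ending) → ((PySem.Dict.mk server_tree).get? k).isSome) ∧
  pvIter server_tree ending accepted_steps (server_tree.length + 1) (pvStarts paths) = []

instance (server_tree : List (String × List String)) (paths : List (List String)) (ending : String) (accepted_steps : List String) : Decidable (Pre_expand_paths_py server_tree paths ending accepted_steps) := by unfold Pre_expand_paths_py; infer_instance

def pvWitness_expand_paths_py : (List (String × List String)) × List (List String) × String × List String :=
  ([("a", ["b", "e"]), ("b", ["e"])], [["a"]], "e", ["a", "b"])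

def Spec_expand_paths_py (server_tree : List (String × List String)) (paths : List (List String)) (ending : String) (accepted_steps : List String) (out : List (List String)) : Prop := out = expand_paths_py_alt server_tree paths ending accepted_steps
instance (server_tree : List (String × List String)) (paths : List (List String)) (ending : String) (accepted_steps : List String) (out : List (List String)) : Decidable (Spec_expand_paths_py server_tree paths ending accepted_steps out) := by unfold Spec_expand_paths_py; infer_instance

-- ===== CLAIM (what is proved, stated in full; the proofs are below) =====
def Claim_equal_expand_paths_py : Prop := ∀ (server_tree : List (String × List String)) (paths : List (List String)) (ending : String) (accepted_steps : List String), Dom_expand_paths_py server_tree paths ending accepted_steps → Pre_expand_paths_py server_tree paths ending accepted_steps → Spec_expand_paths_py server_tree paths ending accepted_steps (expand_paths_py server_tree paths ending accepted_steps)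

-- ===== LEMMAS AND PROOFS =====

-- proof-side recursive DFS: the common denominator of A's rounds and B's stack loop
def pvDfs (server_tree : List (String × List String)) (ending : String) (accepted_steps : List String) : Nat → List String → List (List String)
  | fuel, path =>
    match PySem.List.pyGet? path (-1) with
    | none => []
    | some current_key =>
      if current_key == ending then [path]
      else
        match fuel with
        | 0 => []
        | Nat.succ n =>
          if accepted_steps.contains current_key then
            match (PySem.Dict.mk server_tree).get? current_key with
            | none => []
            | some seeds => seeds.foldl (fun result seed => result ++ pvDfs server_tree ending accepted_steps n (path ++ [seed])) []
          else []

-- what one round of A does to a single path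
def pvStep (server_tree : List (String × List String)) (ending : String) (accepted_steps : List String) (p : List String) : List (List String) :=
  match PySem.List.pyGet? p (-1) with
  | none => []
  | some k =>
    if k == ending then [p]
    else if accepted_steps.contains k then
      (((PySem.Dict.mk server_tree).get? k).getD []).map (fun s => p ++ [s])
    else []

-- a path is "finished" when its last element is `ending`
def pvFin (ending : String) (p : List String) : Bool := PySem.List.pyGet? p (-1) == some ending

lemma pvFin_iff (e : String) (p : List String) :
    pvFin e p = true ↔ PySem.List.pyGet? p (-1) = some e := by
  unfold pvFin
  exact beq_iff_eq

lemma pvStep_fin (st : List (String × List String)) (e : String) (acc : List String)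
    (p : List String) (h : pvFin e p = true) : pvStep st e acc p = [p] := by
  rw [pvFin_iff] at h
  simp [pvStep, h]

lemma pvStep_len_ge (st : List (String × List String)) (e : String) (acc : List String)
    (p : List String) : (if pvFin e p = true then 1 else 0) ≤ (pvStep st e acc p).length := by
  by_cases h : pvFin e p = true
  · rw [if_pos h, pvStep_fin st e acc p h]
    simp
  · simp [h]

-- A's fold over one frontier computes (number of finished paths, flatMap of pvStep)
lemma pvRound_spec (st : List (String × List String)) (e : String) (acc : List String)
    (paths : List (List String)) (c : Nat) (t : List (List String)) :
    paths.foldl (fun s path =>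
        match PySem.List.pyGet? path (-1) with
        | none => s
        | some current_key =>
          if current_key == e then (s.1 + 1, s.2 ++ [path])
          else if acc.contains current_key then
            match (PySem.Dict.mk st).get? current_key with
            | none => s
            | some seeds => (s.1, seeds.foldl (fun tp seed => tp ++ [path ++ [seed]]) s.2)
          else s) (c, t)
      = (c + paths.countP (pvFin e), t ++ paths.flatMap (pvStep st e acc)) := by
  induction paths generalizing c t with
  | nil => simp
  | cons p ps ih =>
    simp only [List.foldl_cons, List.countP_cons, List.flatMap_cons]
    cases h : PySem.List.pyGet? p (-1) with
    | none =>
      rw [ih]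
      simp [pvFin, pvStep, h]
    | some k =>
      by_cases hk : k = e
      · subst hk
        simp only [BEq.rfl, if_pos]
        rw [ih]
        simp [pvFin, pvStep, h]
        omega
      · have hbe : (k == e) = false := by simp [hk]
        by_cases ha : acc.contains k
        · have hmem : k ∈ acc := by simpa using ha
          cases hg : (PySem.Dict.mk st).get? k with
          | none =>
            simp only [hbe, Bool.false_eq_true, if_false, ha, if_true, hg]
            rw [ih]
            simp [pvFin, pvStep, h, hbe, hmem, hg]
          | some seeds =>
            simp only [hbe, Bool.false_eq_true, if_false, ha, if_true, hg]
            rw [PySem.List.foldl_append_singleton_eq_map, ih]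
            simp [pvFin, pvStep, h, hbe, hmem, hg]
        · have hnmem : k ∉ acc := by simpa using ha
          have ha' : acc.contains k = false := by simp [hnmem]
          simp only [hbe, Bool.false_eq_true, if_false, ha', if_false]
          rw [ih]
          simp [pvFin, pvStep, h, hbe, hnmem]

-- a finished path is its own DFS result, at any fuel
lemma pvDfs_fin (st : List (String × List String)) (e : String) (acc : List String)
    (n : Nat) (p : List String) (h : pvFin e p = true) :
    pvDfs st e acc n p = [p] := by
  rw [pvFin_iff] at h
  conv_lhs => rw [pvDfs]
  simp [h]

-- one DFS level = one round step followed by DFS at one less fuel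
lemma pvDfs_succ (st : List (String × List String)) (e : String) (acc : List String)
    (n : Nat) (p : List String) :
    pvDfs st e acc (n + 1) p = (pvStep st e acc p).flatMap (pvDfs st e acc n) := by
  conv_lhs => rw [pvDfs]
  cases h : PySem.List.pyGet? p (-1) with
  | none => simp [pvStep, h]
  | some k =>
    by_cases hk : k = e
    · have hbt : (k == e) = true := by simp [hk]
      have hfin : pvFin e p = true := by rw [pvFin_iff, h, hk]
      simp only [hbt, if_true]
      rw [pvStep_fin st e acc p hfin, List.flatMap_cons, List.flatMap_nil, List.append_nil]
      exact (pvDfs_fin st e acc n p hfin).symm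
    · have hbe : (k == e) = false := by simp [hk]
      by_cases ha : acc.contains k
      · have hmem : k ∈ acc := by simpa using ha
        cases hg : (PySem.Dict.mk st).get? k with
        | none => simp [pvStep, h, hbe, hmem, hg]
        | some seeds =>
          simp only [hbe, Bool.false_eq_true, if_false, ha, if_true, hg]
          rw [PySem.List.foldl_append_eq_flatMap, List.nil_append]
          simp only [pvStep, h, hbe, Bool.false_eq_true, if_false, ha, if_true, hg,
            Option.getD_some, List.flatMap_map]
      · have hnmem : k ∉ acc := by simpa using ha
        have ha' : acc.contains k = false := by simp [hnmem]
        simp [pvStep, h, hbe, hnmem]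

-- DFS over an all-finished frontier is the identity
lemma pvDfs_flatMap_fin (st : List (String × List String)) (e : String) (acc : List String)
    (n : Nat) (F : List (List String)) (h : ∀ p ∈ F, pvFin e p = true) :
    F.flatMap (pvDfs st e acc n) = F := by
  induction F with
  | nil => simp
  | cons p ps ih =>
    rw [List.flatMap_cons, pvDfs_fin st e acc n p (h p (by simp)),
      ih (fun q hq => h q (by simp [hq]))]
    simp

-- counting finished paths never exceeds the size of the next frontier …
lemma pvCount_le (st : List (String × List String)) (e : String) (acc : List String)
    (F : List (List String)) :
    F.countP (pvFin e) ≤ (F.flatMap (pvStep st e acc)).length := by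
  induction F with
  | nil => simp
  | cons p ps ih =>
    rw [List.countP_cons, List.flatMap_cons, List.length_append]
    have := pvStep_len_ge st e acc p
    omega

-- … with equality exactly when every path steps to itself (finished) or to nothing
lemma pvBreak_char (st : List (String × List String)) (e : String) (acc : List String)
    (F : List (List String))
    (h : F.countP (pvFin e) = (F.flatMap (pvStep st e acc)).length) :
    ∀ p ∈ F, pvStep st e acc p = if pvFin e p = true then [p] else [] := by
  induction F with
  | nil => simp
  | cons p ps ih =>
    rw [List.countP_cons, List.flatMap_cons, List.length_append] at h
    have h1 := pvStep_len_ge st e acc p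
    have h2 := pvCount_le st e acc ps
    have hps : ps.countP (pvFin e) = (ps.flatMap (pvStep st e acc)).length := by omega
    have hp : (pvStep st e acc p).length = (if pvFin e p = true then 1 else 0) := by omega
    intro q hq
    rcases List.mem_cons.mp hq with rfl | hq'
    · by_cases hf : pvFin e q = true
      · rw [if_pos hf]
        exact pvStep_fin st e acc q hf
      · rw [if_neg hf]
        rw [if_neg hf] at hp
        exact List.eq_nil_of_length_eq_zero hp
    · exact ih hps q hq'

-- everything one round produces ends in `ending` or in the next key frontier
lemma pvStep_inv (st : List (String × List String)) (e : String) (acc : List String)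
    (G : List String) (p q : List String)
    (hp : ∃ k, PySem.List.pyGet? p (-1) = some k ∧ (k = e ∨ k ∈ G))
    (hq : q ∈ pvStep st e acc p) :
    ∃ k', PySem.List.pyGet? q (-1) = some k' ∧
      (k' = e ∨ k' ∈ (G.flatMap (pvSucc st e acc)).dedup) := by
  obtain ⟨k, hk, hkG⟩ := hp
  unfold pvStep at hq
  rw [hk] at hq
  have hq' : q ∈ (if k == e then [p]
      else if acc.contains k then
        (((PySem.Dict.mk st).get? k).getD []).map (fun s => p ++ [s])
      else []) := hq
  by_cases hke : k = e
  · subst hke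
    rw [if_pos BEq.rfl] at hq'
    rw [List.mem_singleton] at hq'
    subst hq'
    exact ⟨k, hk, Or.inl rfl⟩
  · rw [if_neg (by simp [hke])] at hq'
    by_cases ha : acc.contains k
    · rw [if_pos ha] at hq'
      obtain ⟨s, hs, rfl⟩ := List.mem_map.mp hq'
      refine ⟨s, PySem.List.pyGet?_neg_one_append_singleton p s, Or.inr ?_⟩
      rw [List.mem_dedup]
      refine List.mem_flatMap.mpr ⟨k, hkG.resolve_left hke, ?_⟩
      unfold pvSucc
      rw [if_pos (by simp [hke, show k ∈ acc from by simpa using ha])]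
      exact hs
    · rw [if_neg ha] at hq'
      simp at hq'

-- main lemma for A: while the key frontier dies within the fuel, A's loop is the DFS
lemma pvMain (st : List (String × List String)) (e : String) (acc : List String) :
    ∀ (j : Nat) (G : List String) (F : List (List String)),
      pvIter st e acc j G = [] →
      (∀ p ∈ F, ∃ k, PySem.List.pyGet? p (-1) = some k ∧ (k = e ∨ k ∈ G)) →
      pvLoopA st e acc (j + 1) F = F.flatMap (pvDfs st e acc (j + 1)) := by
  intro j
  induction j with
  | zero =>
    intro G F hG hF
    unfold pvIter at hG
    subst hG
    have hfin : ∀ p ∈ F, pvFin e p = true := by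
      intro p hp
      obtain ⟨k, hk, hke⟩ := hF p hp
      rcases hke with rfl | h
      · rw [pvFin_iff]; exact hk
      · simp at h
    have hstep : F.flatMap (pvStep st e acc) = F := by
      calc F.flatMap (pvStep st e acc) = F.flatMap (fun p => [p]) :=
            List.flatMap_congr (by intro p hp; rw [pvStep_fin st e acc p (hfin p hp)])
        _ = F := List.flatMap_singleton' F
    have hcount : F.countP (pvFin e) = F.length := List.countP_eq_length.mpr hfin
    unfold pvLoopA
    rw [pvRound_spec]
    simp only [Nat.zero_add, List.nil_append, hstep, hcount, beq_self_eq_true, if_pos]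
    exact (pvDfs_flatMap_fin st e acc 1 F hfin).symm
  | succ j ih =>
    intro G F hG hF
    have hG' : pvIter st e acc j ((G.flatMap (pvSucc st e acc)).dedup) = [] := hG
    have hF' : ∀ q ∈ F.flatMap (pvStep st e acc), ∃ k', PySem.List.pyGet? q (-1) = some k' ∧
        (k' = e ∨ k' ∈ (G.flatMap (pvSucc st e acc)).dedup) := by
      intro q hq
      obtain ⟨p, hp, hq'⟩ := List.mem_flatMap.mp hq
      exact pvStep_inv st e acc G p q (hF p hp) hq'
    have hdfs : F.flatMap (pvDfs st e acc (j + 1 + 1)) =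
        (F.flatMap (pvStep st e acc)).flatMap (pvDfs st e acc (j + 1)) := by
      rw [List.flatMap_assoc]
      exact List.flatMap_congr (by intro p _; rw [pvDfs_succ])
    show pvLoopA st e acc (j + 1 + 1) F = _
    unfold pvLoopA
    rw [pvRound_spec]
    simp only [Nat.zero_add, List.nil_append]
    by_cases hbr : F.countP (pvFin e) = (F.flatMap (pvStep st e acc)).length
    · rw [if_pos (by simpa using hbr)]
      have hfin : ∀ q ∈ F.flatMap (pvStep st e acc), pvFin e q = true := by
        intro q hq
        obtain ⟨p, hp, hq'⟩ := List.mem_flatMap.mp hq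
        have := pvBreak_char st e acc F hbr p hp
        rw [this] at hq'
        by_cases hf : pvFin e p = true
        · rw [if_pos hf] at hq'
          rw [List.mem_singleton] at hq'
          subst hq'
          exact hf
        · rw [if_neg hf] at hq'
          simp at hq'
      rw [hdfs, pvDfs_flatMap_fin st e acc (j + 1) _ hfin]
    · rw [if_neg (by simpa using hbr)]
      rw [ih ((G.flatMap (pvSucc st e acc)).dedup) (F.flatMap (pvStep st e acc)) hG' hF']
      exact hdfs.symm

-- ---------- B-side lemmas: the stack loop is the DFS ----------

-- peeling pvIter from the other end
lemma pvIter_add (st : List (String × List String)) (e : String) (acc : List String)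
    (a b : Nat) (g : List String) :
    pvIter st e acc (a + b) g = pvIter st e acc a (pvIter st e acc b g) := by
  induction b generalizing g with
  | zero => rfl
  | succ b ih =>
    show pvIter st e acc (a + b + 1) g = _
    have h1 : a + b + 1 = (a + b) + 1 := rfl
    rw [h1]
    show pvIter st e acc (a + b) ((g.flatMap (pvSucc st e acc)).dedup) = _
    rw [ih]
    rfl

lemma pvIter_nil (st : List (String × List String)) (e : String) (acc : List String)
    (n : Nat) : pvIter st e acc n [] = [] := by
  induction n with
  | zero => rfl
  | succ n ih =>
    show pvIter st e acc n (([] : List String).flatMap (pvSucc st e acc)).dedup = []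
    simpa using ih

lemma pvIter_mem_mono (st : List (String × List String)) (e : String) (acc : List String) :
    ∀ (n : Nat) (G1 G2 : List String), (∀ y ∈ G1, y ∈ G2) →
      ∀ x ∈ pvIter st e acc n G1, x ∈ pvIter st e acc n G2 := by
  intro n
  induction n with
  | zero => intro G1 G2 h x hx; exact h x hx
  | succ n ih =>
    intro G1 G2 h x hx
    refine ih _ _ ?_ x hx
    intro y hy
    rw [List.mem_dedup] at hy ⊢
    obtain ⟨z, hz, hy'⟩ := List.mem_flatMap.mp hy
    exact List.mem_flatMap.mpr ⟨z, h z hz, hy'⟩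

-- "key k is good": every key-graph walk from k dies within n steps
def pvGood (st : List (String × List String)) (e : String) (acc : List String) (n : Nat) (k : String) : Prop :=
  pvIter st e acc n [k] = []

lemma pvGood_of_mem (st : List (String × List String)) (e : String) (acc : List String)
    (n : Nat) (G : List String) (hG : pvIter st e acc n G = []) (k : String) (hk : k ∈ G) :
    pvGood st e acc n k := by
  unfold pvGood
  rw [List.eq_nil_iff_forall_not_mem]
  intro x hx
  have := pvIter_mem_mono st e acc n [k] G (by intro y hy; rw [List.mem_singleton] at hy; exact hy ▸ hk) x hx
  rw [hG] at this
  simp at this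

lemma pvGood_mono (st : List (String × List String)) (e : String) (acc : List String)
    (n m : Nat) (k : String) (hnm : n ≤ m) (h : pvGood st e acc n k) :
    pvGood st e acc m k := by
  unfold pvGood at h ⊢
  obtain ⟨d, rfl⟩ := Nat.exists_eq_add_of_le hnm
  rw [Nat.add_comm, pvIter_add, h, pvIter_nil]

lemma pvGood_zero_false (st : List (String × List String)) (e : String) (acc : List String)
    (k : String) : ¬ pvGood st e acc 0 k := by
  unfold pvGood pvIter
  simp

lemma pvGood_child (st : List (String × List String)) (e : String) (acc : List String)
    (n : Nat) (k s : String) (h : pvGood st e acc (n + 1) k)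
    (hs : s ∈ pvSucc st e acc k) : pvGood st e acc n s := by
  unfold pvGood at h
  have h' : pvIter st e acc n (([k].flatMap (pvSucc st e acc)).dedup) = [] := h
  refine pvGood_of_mem st e acc n _ h' s ?_
  rw [List.mem_dedup]
  exact List.mem_flatMap.mpr ⟨k, by simp, hs⟩

lemma pvSucc_eq_seeds (st : List (String × List String)) (e : String) (acc : List String)
    (k : String) (seeds : List String) (hke : ¬ k = e) (ha : acc.contains k = true)
    (hg : (PySem.Dict.mk st).get? k = some seeds) :
    pvSucc st e acc k = seeds := by
  unfold pvSucc
  rw [if_pos (by simp [hke, show k ∈ acc from by simpa using ha]), hg]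
  rfl

-- DFS fuel stability: above a good key's level, the fuel does not matter
lemma pvDfs_stable (st : List (String × List String)) (e : String) (acc : List String) :
    ∀ (n : Nat) (p : List String) (k : String) (m : Nat),
      PySem.List.pyGet? p (-1) = some k → pvGood st e acc n k → n ≤ m →
      pvDfs st e acc m p = pvDfs st e acc n p := by
  intro n
  induction n with
  | zero => intro p k m hk hg _; exact absurd hg (pvGood_zero_false st e acc k)
  | succ n ih =>
    intro p k m hk hg hnm
    obtain ⟨m, rfl⟩ : ∃ m', m = m' + 1 := ⟨m - 1, by omega⟩
    by_cases hke : k = e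
    · have hfin : pvFin e p = true := by rw [pvFin_iff, hk, hke]
      rw [pvDfs_fin st e acc _ p hfin, pvDfs_fin st e acc _ p hfin]
    · rw [pvDfs_succ, pvDfs_succ]
      refine List.flatMap_congr ?_
      intro q hq
      by_cases ha : acc.contains k
      · cases hgk : (PySem.Dict.mk st).get? k with
        | none =>
          simp [pvStep, hk, hke, hgk] at hq
        | some seeds =>
          simp only [pvStep, hk, beq_iff_eq, hke, if_false, ha, if_true, hgk,
            Option.getD_some] at hq
          obtain ⟨s, hs, rfl⟩ := List.mem_map.mp hq
          have hgs : pvGood st e acc n s :=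
            pvGood_child st e acc n k s hg
              (by rw [pvSucc_eq_seeds st e acc k seeds hke ha hgk]; exact hs)
          exact ih _ s _ (PySem.List.pyGet?_neg_one_append_singleton p s) hgs (by omega)
      · have ha' : k ∉ acc := by simpa using ha
        simp [pvStep, hk, hke, ha'] at hq

-- cost fuel stability: same argument for the iteration bound
lemma pvCostK_stable (st : List (String × List String)) (e : String) (acc : List String) :
    ∀ (n : Nat) (k : String) (m : Nat),
      pvGood st e acc n k → n ≤ m →
      pvCostK st e acc m k = pvCostK st e acc n k := by
  intro n
  induction n with
  | zero => intro k m hg _; exact absurd hg (pvGood_zero_false st e acc k)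
  | succ n ih =>
    intro k m hg hnm
    obtain ⟨m, rfl⟩ : ∃ m', m = m' + 1 := ⟨m - 1, by omega⟩
    simp only [pvCostK]
    by_cases hke : k = e
    · simp [hke]
    · simp only [beq_iff_eq, hke, if_false]
      by_cases ha : acc.contains k
      · simp only [ha, if_true]
        cases hgk : (PySem.Dict.mk st).get? k with
        | none => rfl
        | some seeds =>
          have : seeds.map (pvCostK st e acc m) = seeds.map (pvCostK st e acc n) := by
            refine List.map_congr_left ?_
            intro s hs
            have hgs : pvGood st e acc n s :=
              pvGood_child st e acc n k s hg
                (by rw [pvSucc_eq_seeds st e acc k seeds hke ha hgk]; exact hs)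
            exact ih s m hgs (by omega)
          simp [this]
      · simp [show k ∉ acc from by simpa using ha]

lemma pvCostK_pos (st : List (String × List String)) (e : String) (acc : List String)
    (n : Nat) (k : String) : 1 ≤ pvCostK st e acc n k := by
  cases n with
  | zero => simp [pvCostK]
  | succ n =>
    simp only [pvCostK]
    split
    · exact le_refl 1
    · split
      · split
        · exact le_refl 1
        · omega
      · exact le_refl 1

lemma pvStackCost_cons (st : List (String × List String)) (e : String) (acc : List String)
    (d : Nat) (p : List String) (rest : List (List String)) :
    pvStackCost st e acc d (p :: rest) =
      (match PySem.List.pyGet? p (-1) with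
       | none => 1
       | some k => pvCostK st e acc d k) + pvStackCost st e acc d rest := by
  unfold pvStackCost
  simp

lemma pvStackCost_append (st : List (String × List String)) (e : String) (acc : List String)
    (d : Nat) (s1 s2 : List (List String)) :
    pvStackCost st e acc d (s1 ++ s2) = pvStackCost st e acc d s1 + pvStackCost st e acc d s2 := by
  unfold pvStackCost
  simp

-- pushing the reversed seeds in a Python loop = mapped children in front of the stack
lemma pvPush_eq (p : List String) (seeds : List String) (stack : List (List String)) :
    seeds.reverse.foldl (fun st seed => (p ++ [seed]) :: st) stack
      = seeds.map (fun s => p ++ [s]) ++ stack := by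
  induction seeds generalizing stack with
  | nil => simp
  | cons s ss ih =>
    rw [List.reverse_cons, List.foldl_append]
    simp only [List.foldl_cons, List.foldl_nil, List.map_cons, List.cons_append]
    rw [ih]

-- THE stack-loop lemma: with good keys and enough fuel, the run is the DFS concatenation
lemma pvRunEq (st : List (String × List String)) (e : String) (acc : List String) :
    ∀ (fuel : Nat) (stack out : List (List String)),
      (∀ p ∈ stack, ∃ k, PySem.List.pyGet? p (-1) = some k ∧ pvGood st e acc (st.length + 1) k) →
      pvStackCost st e acc (st.length + 2) stack ≤ fuel →
      pvRun st e acc fuel stack out = out ++ stack.flatMap (pvDfs st e acc (st.length + 2)) := by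
  intro fuel
  induction fuel with
  | zero =>
    intro stack out hG hC
    cases stack with
    | nil => simp [pvRun]
    | cons p rest =>
      exfalso
      rw [pvStackCost_cons] at hC
      have h1 : 1 ≤ (match PySem.List.pyGet? p (-1) with
          | none => 1
          | some k => pvCostK st e acc (st.length + 2) k) := by
        cases PySem.List.pyGet? p (-1) with
        | none => exact le_refl 1
        | some k => exact pvCostK_pos st e acc _ k
      omega
  | succ fuel ih =>
    intro stack out hG hC
    cases stack with
    | nil => simp [pvRun]
    | cons p rest =>
      obtain ⟨k, hk, hgood⟩ := hG p (by simp)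
      rw [pvStackCost_cons] at hC
      simp only [hk] at hC
      have hrest : ∀ q ∈ rest, ∃ k', PySem.List.pyGet? q (-1) = some k' ∧ pvGood st e acc (st.length + 1) k' := by
        intro q hq; exact hG q (by simp [hq])
      have hpos := pvCostK_pos st e acc (st.length + 2) k
      show pvRun st e acc (fuel + 1) (p :: rest) out = _
      unfold pvRun
      simp only [hk]
      by_cases hke : k = e
      · rw [if_pos (by simp [hke])]
        rw [ih rest (out ++ [p]) hrest (by omega)]
        have hfin : pvFin e p = true := by rw [pvFin_iff, hk, hke]
        rw [List.flatMap_cons, pvDfs_fin st e acc _ p hfin]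
        simp
      · rw [if_neg (by simp [hke])]
        have hDsucc : st.length + 2 = (st.length + 1) + 1 := rfl
        by_cases ha : acc.contains k
        · rw [if_pos ha]
          cases hgk : (PySem.Dict.mk st).get? k with
          | none =>
            rw [ih rest out hrest (by omega)]
            have hnil : pvDfs st e acc (st.length + 2) p = [] := by
              rw [hDsucc, pvDfs_succ]
              simp [pvStep, hk, hke, hgk]
            rw [List.flatMap_cons, hnil]
            simp
          | some seeds =>
            dsimp only
            rw [pvPush_eq]
            set children := seeds.map (fun s => p ++ [s]) with hch
            have hchildgood : ∀ q ∈ children, ∃ k', PySem.List.pyGet? q (-1) = some k' ∧ pvGood st e acc (st.length + 1) k' := by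
              intro q hq
              obtain ⟨s, hs, rfl⟩ := List.mem_map.mp hq
              refine ⟨s, PySem.List.pyGet?_neg_one_append_singleton p s, ?_⟩
              have : pvGood st e acc st.length s :=
                pvGood_child st e acc st.length k s hgood
                  (by rw [pvSucc_eq_seeds st e acc k seeds hke ha hgk]; exact hs)
              exact pvGood_mono st e acc st.length (st.length + 1) s (by omega) this
            have hseedgood : ∀ s ∈ seeds, pvGood st e acc st.length s := by
              intro s hs
              exact pvGood_child st e acc st.length k s hgood
                (by rw [pvSucc_eq_seeds st e acc k seeds hke ha hgk]; exact hs)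
            -- the cost of the children equals the expansion of the parent's cost
            have hcost : pvStackCost st e acc (st.length + 2) children
                = (seeds.map (pvCostK st e acc (st.length + 1))).sum := by
              unfold pvStackCost
              rw [hch, List.map_map]
              congr 1
              refine List.map_congr_left ?_
              intro s hs
              show (match PySem.List.pyGet? (p ++ [s]) (-1) with
                    | none => 1
                    | some k' => pvCostK st e acc (st.length + 2) k') = _
              rw [PySem.List.pyGet?_neg_one_append_singleton p s]
              show pvCostK st e acc (st.length + 2) s = _
              rw [pvCostK_stable st e acc st.length s (st.length + 2) (hseedgood s hs) (by omega),
                pvCostK_stable st e acc st.length s (st.length + 1) (hseedgood s hs) (by omega)]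
            have hkcost : pvCostK st e acc (st.length + 2) k
                = 1 + (seeds.map (pvCostK st e acc (st.length + 1))).sum := by
              rw [hDsucc]
              simp only [pvCostK, beq_iff_eq, hke, if_false, ha, if_true]
              rw [hgk]
            have hall : ∀ q ∈ children ++ rest, ∃ k', PySem.List.pyGet? q (-1) = some k' ∧ pvGood st e acc (st.length + 1) k' := by
              intro q hq
              rcases List.mem_append.mp hq with h | h
              · exact hchildgood q h
              · exact hrest q h
            have hfuel : pvStackCost st e acc (st.length + 2) (children ++ rest) ≤ fuel := by
              rw [pvStackCost_append, hcost]
              omega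
            rw [ih (children ++ rest) out hall hfuel]
            rw [List.flatMap_append, List.flatMap_cons]
            congr 2
            -- children.flatMap (pvDfs D) = pvDfs D p
            have hstep : pvStep st e acc p = children := by
              simp only [pvStep, hk, beq_iff_eq, hke, if_false, ha, if_true, hgk,
                Option.getD_some]
              exact hch.symm
            rw [hDsucc, pvDfs_succ, hstep]
            refine (List.flatMap_congr ?_)
            intro q hq
            obtain ⟨s, hs, rfl⟩ := List.mem_map.mp hq
            have hgs := hseedgood s hs
            rw [pvDfs_stable st e acc st.length (p ++ [s]) s (st.length + 1)
                  (PySem.List.pyGet?_neg_one_append_singleton p s) hgs (by omega),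
              pvDfs_stable st e acc st.length (p ++ [s]) s ((st.length + 1) + 1)
                  (PySem.List.pyGet?_neg_one_append_singleton p s) hgs (by omega)]
        · rw [if_neg ha]
          rw [ih rest out hrest (by omega)]
          have hnil : pvDfs st e acc (st.length + 2) p = [] := by
            rw [hDsucc, pvDfs_succ]
            have ha' : k ∉ acc := by simpa using ha
            simp [pvStep, hk, hke, ha']
          rw [List.flatMap_cons, hnil]
          simp

-- ===== VERDICT (by name: the statement is the Claim_ definition above) =====
theorem expand_paths_py_spec : Claim_equal_expand_paths_py := by
  intro st paths e acc _hDom hPre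
  obtain ⟨hne, _hkey, hiter⟩ := hPre
  unfold Spec_expand_paths_py expand_paths_py expand_paths_py_alt
  have hkeys : ∀ p ∈ paths, ∃ k, PySem.List.pyGet? p (-1) = some k ∧ k ∈ pvStarts paths := by
    intro p hp
    have hpne := hne p hp
    obtain ⟨k, hk⟩ : ∃ k, PySem.List.pyGet? p (-1) = some k := by
      rw [PySem.List.pyGet?_neg_one]
      cases hgl : p.getLast? with
      | none => exact absurd (List.getLast?_eq_none_iff.mp hgl) hpne
      | some k => exact ⟨k, rfl⟩
    refine ⟨k, hk, ?_⟩
    unfold pvStarts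
    rw [List.mem_dedup]
    exact List.mem_filterMap.mpr ⟨p, hp, hk⟩
  -- A's loop is the depth-(|st|+2) DFS
  have hA : pvLoopA st e acc (st.length + 2) paths
      = paths.flatMap (pvDfs st e acc (st.length + 2)) := by
    have hF : ∀ p ∈ paths, ∃ k, PySem.List.pyGet? p (-1) = some k ∧
        (k = e ∨ k ∈ pvStarts paths) := by
      intro p hp
      obtain ⟨k, hk, hmem⟩ := hkeys p hp
      exact ⟨k, hk, Or.inr hmem⟩
    have := pvMain st e acc (st.length + 1) (pvStarts paths) paths hiter hF
    simpa using this
  -- B's per-path stack runs concatenate to the same DFS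
  have hB : ∀ (init : List (List String)) (ps : List (List String)),
      (∀ p ∈ ps, p ∈ paths) →
      ps.foldl (fun out start =>
        pvRun st e acc (pvStackCost st e acc (st.length + 2) [start]) [start] out) init
      = init ++ ps.flatMap (pvDfs st e acc (st.length + 2)) := by
    intro init ps hps
    induction ps generalizing init with
    | nil => simp
    | cons p ps ih =>
      rw [List.foldl_cons]
      obtain ⟨k, hk, hmem⟩ := hkeys p (hps p (by simp))
      have hgood : pvGood st e acc (st.length + 1) k :=
        pvGood_of_mem st e acc (st.length + 1) (pvStarts paths) hiter k hmem
      rw [pvRunEq st e acc _ [p] init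
            (by intro q hq; rw [List.mem_singleton] at hq; exact hq ▸ ⟨k, hk, hgood⟩)
            (le_refl _),
        ih _ (by intro q hq; exact hps q (by simp [hq]))]
      simp
  rw [hA, hB [] paths (fun p hp => hp)]
  simp
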